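-- pv_equiv track=rewrite | github.com/MasterTemple/create-audio-bible | find_readings.py | binary_search_near
-- ===== SOURCE A (Python) =====
-- def binary_search_near(arr: list[tuple[int, int]], x: int, threshold: int) -> int:
--     low = 0
--     high = len(arr) - 1
--     mid = 0
--     while low <= high:
--         mid = (high + low) // 2
--         if abs(x - arr[mid][1]) < threshold:
--             return arr[mid][1]
--         # If x is greater, ignore left half
--         elif arr[mid][1] < x:
--             low = mid + 1
--         # If x is smaller, ignore right half
--         elif arr[mid][1] > x:
--             high = mid - 1
--         # means x is present at mid
--         else:
--             return arr[mid][1]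
--     # If we reach here, then the element was not present
--     return -1
-- ===== SOURCE B (Python) =====
-- def binary_search_near(arr: list[tuple[int, int]], x: int, threshold: int) -> int:
--     if not arr:
--         return -1
--     mid = (len(arr) - 1) // 2
--     v = arr[mid][1]
--     if abs(x - v) < threshold:
--         return v
--     if v < x:
--         return binary_search_near(arr[mid + 1:], x, threshold)
--     if v > x:
--         return binary_search_near(arr[:mid], x, threshold)
--     return v
-- ===== Notes on version B (the rewrite author's own statement) =====
-- stated objective: alternative
-- what changed: Replaced the iterative low/high while-loop with a slice-based recursive divide-and-conquer: B recurses on arr[mid+1:] or arr[:mid] and has no index state, visiting the same midpoints.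
import Mathlib
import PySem

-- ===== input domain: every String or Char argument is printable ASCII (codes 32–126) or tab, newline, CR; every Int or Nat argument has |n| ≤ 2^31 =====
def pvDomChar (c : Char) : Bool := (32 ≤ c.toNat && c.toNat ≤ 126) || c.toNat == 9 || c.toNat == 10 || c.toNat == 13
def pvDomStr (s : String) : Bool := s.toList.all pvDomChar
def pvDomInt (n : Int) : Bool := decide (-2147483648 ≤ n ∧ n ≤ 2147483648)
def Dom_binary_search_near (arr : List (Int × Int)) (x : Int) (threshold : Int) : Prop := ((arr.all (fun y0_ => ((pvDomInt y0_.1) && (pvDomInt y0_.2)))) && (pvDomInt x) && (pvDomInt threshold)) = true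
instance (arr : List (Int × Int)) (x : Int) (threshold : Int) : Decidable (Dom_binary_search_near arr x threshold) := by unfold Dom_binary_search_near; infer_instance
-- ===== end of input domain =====

-- B replaces A's iterative low/high while-loop with a slice-based recursion carrying no index state; objective: alternative decomposition, same values.

-- ===== PORT A =====
-- A's while loop as recursion on the interval width; the 'none' arm of pyGet? is
-- unreachable from the entry point (0 ≤ low ∧ high < len is a loop invariant).
def bsnLoop (arr : List (Int × Int)) (x : Int) (threshold : Int) (low high : Int) : Int :=
  if _h : low ≤ high then
    let mid := PySem.Int.floordiv (high + low) 2
    match PySem.List.pyGet? arr mid with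
    | none => -1
    | some p =>
      if |x - p.2| < threshold then p.2
      else if p.2 < x then bsnLoop arr x threshold (mid + 1) high
      else if p.2 > x then bsnLoop arr x threshold low (mid - 1)
      else p.2
  else -1
termination_by (high + 1 - low).toNat
decreasing_by
  · have := PySem.Int.floordiv_two_mid_bounds (lo := low) (hi := high) _h
    rw [add_comm low high] at this
    omega
  · have := PySem.Int.floordiv_two_mid_bounds (lo := low) (hi := high) _h
    rw [add_comm low high] at this
    omega

def binary_search_near (arr : List (Int × Int)) (x : Int) (threshold : Int) : Int :=
  bsnLoop arr x threshold 0 ((arr.length : Int) - 1)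

-- ===== PORT B =====
def binary_search_near_alt (arr : List (Int × Int)) (x : Int) (threshold : Int) : Int :=
  match arr with
  | [] => -1
  | q :: qs =>
    let l := q :: qs
    let mid := PySem.Int.floordiv ((l.length : Int) - 1) 2
    match PySem.List.pyGet? l mid with
    | none => -1
    | some p =>
      if |x - p.2| < threshold then p.2
      else if p.2 < x then binary_search_near_alt (PySem.List.slice l (some (mid + 1)) none) x threshold
      else if p.2 > x then binary_search_near_alt (PySem.List.slice l none (some mid)) x threshold
      else p.2
termination_by arr.length
decreasing_by
  · have hb := PySem.Int.floordiv_two_mid_bounds (lo := (0:Int)) (hi := ((q :: qs).length : Int) - 1)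
      (by simp)
    rw [zero_add] at hb
    simp only [PySem.List.slice_from (q :: qs) (show (0:Int) ≤ PySem.Int.floordiv (((q :: qs).length : Int) - 1) 2 + 1 by omega)]
    simp only [List.length_drop, List.length_cons] at hb ⊢
    omega
  · have hb := PySem.Int.floordiv_two_mid_bounds (lo := (0:Int)) (hi := ((q :: qs).length : Int) - 1)
      (by simp)
    rw [zero_add] at hb
    simp only [PySem.List.slice_to (q :: qs) (show (0:Int) ≤ PySem.Int.floordiv (((q :: qs).length : Int) - 1) 2 by omega)]
    simp only [List.length_take, List.length_cons] at hb ⊢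
    omega

-- ===== PRECONDITION & SPEC =====
def Spec_binary_search_near (arr : List (Int × Int)) (x : Int) (threshold : Int) (out : Int) : Prop := out = binary_search_near_alt arr x threshold
instance (arr : List (Int × Int)) (x : Int) (threshold : Int) (out : Int) : Decidable (Spec_binary_search_near arr x threshold out) := by unfold Spec_binary_search_near; infer_instance

-- ===== CLAIM (what is proved, stated in full; the proofs are below) =====
def Claim_equal_binary_search_near : Prop := ∀ (arr : List (Int × Int)) (x : Int) (threshold : Int), Dom_binary_search_near arr x threshold → Spec_binary_search_near arr x threshold (binary_search_near arr x threshold)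

-- ===== LEMMAS AND PROOFS =====

-- midpoint translation: low + (high-low)//2 = (high+low)//2
theorem bsn_mid_shift (low high : Int) :
    low + PySem.Int.floordiv (high - low) 2 = PySem.Int.floordiv (high + low) 2 := by
  have h1 := PySem.Int.floordiv_mul_add_mod (high - low) 2
  have h2 := PySem.Int.floordiv_mul_add_mod (high + low) 2
  have r1a := PySem.Int.mod_nonneg (high - low) (b := 2) (by omega)
  have r1b := PySem.Int.mod_lt (high - low) (b := 2) (by omega)
  have r2a := PySem.Int.mod_nonneg (high + low) (b := 2) (by omega)
  have r2b := PySem.Int.mod_lt (high + low) (b := 2) (by omega)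
  omega

-- one-step unfolding of B's port when the midpoint lookup succeeds
theorem bsn_alt_step (l : List (Int × Int)) (x t : Int) (hne : l ≠ []) (p : Int × Int)
    (hp : PySem.List.pyGet? l (PySem.Int.floordiv ((l.length : Int) - 1) 2) = some p) :
    binary_search_near_alt l x t =
      (if |x - p.2| < t then p.2
       else if p.2 < x then binary_search_near_alt (PySem.List.slice l (some (PySem.Int.floordiv ((l.length : Int) - 1) 2 + 1)) none) x t
       else if p.2 > x then binary_search_near_alt (PySem.List.slice l none (some (PySem.Int.floordiv ((l.length : Int) - 1) 2))) x t
       else p.2) := by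
  cases l with
  | nil => exact absurd rfl hne
  | cons q qs => rw [binary_search_near_alt]; simp only [hp]

-- one-step unfolding of A's loop when the midpoint lookup succeeds
theorem bsn_loop_step (arr : List (Int × Int)) (x t low high : Int) (h : low ≤ high) (p : Int × Int)
    (hp : PySem.List.pyGet? arr (PySem.Int.floordiv (high + low) 2) = some p) :
    bsnLoop arr x t low high =
      (if |x - p.2| < t then p.2
       else if p.2 < x then bsnLoop arr x t (PySem.Int.floordiv (high + low) 2 + 1) high
       else if p.2 > x then bsnLoop arr x t low (PySem.Int.floordiv (high + low) 2 - 1)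
       else p.2) := by
  rw [bsnLoop, dif_pos h]; simp only [hp]

-- A's loop on [low, high] computes B on the sub-list arr[low .. high]
theorem bsn_loop_eq_alt (arr : List (Int × Int)) (x t : Int) :
    ∀ (n : Nat) (low high : Int), (high + 1 - low).toNat ≤ n → 0 ≤ low → high < (arr.length : Int) →
      bsnLoop arr x t low high =
        binary_search_near_alt ((arr.drop low.toNat).take (high + 1 - low).toNat) x t := by
  intro n
  induction n with
  | zero =>
    intro low high hn hlow hhigh
    have hlh : ¬ low ≤ high := by omega
    have h0 : (high + 1 - low).toNat = 0 := by omega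
    rw [bsnLoop, dif_neg hlh, h0, List.take_zero, binary_search_near_alt]
  | succ n ih =>
    intro low high hn hlow hhigh
    by_cases hlh : low ≤ high
    · have hma := PySem.Int.floordiv_two_mid_bounds (lo := low) (hi := high) hlh
      rw [add_comm low high] at hma
      have hmb := PySem.Int.floordiv_two_mid_bounds (lo := (0:Int)) (hi := high - low) (by omega)
      rw [zero_add] at hmb
      have hshift := bsn_mid_shift low high
      set midA := PySem.Int.floordiv (high + low) 2 with hmidA
      set midB := PySem.Int.floordiv (high - low) 2 with hmidB
      set sub := (arr.drop low.toNat).take (high + 1 - low).toNat with hsub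
      have hsublen : sub.length = (high + 1 - low).toNat := by
        simp [hsub]; omega
      have hsubne : sub ≠ [] := by
        intro hc
        have := congrArg List.length hc
        simp [hsublen] at this
        omega
      have hcast : ((sub.length : Int) - 1) = high - low := by rw [hsublen]; omega
      have hidxA := PySem.List.pyGet?_eq_some_getElem arr (i := midA) (by omega) (by omega)
      have hmbl : midB < (sub.length : Int) := by rw [hsublen]; omega
      have hidxB := PySem.List.pyGet?_eq_some_getElem sub (i := midB) (by omega) hmbl
      have helem : sub[midB.toNat]'(by omega) = arr[midA.toNat]'(by omega) := by
        simp only [hsub, List.getElem_take, List.getElem_drop]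
        congr 1
        omega
      have hidxB' : PySem.List.pyGet? sub (PySem.Int.floordiv ((sub.length : Int) - 1) 2) =
          some (arr[midA.toNat]'(by omega)) := by
        rw [hcast, ← hmidB, hidxB, helem]
      have hslice_r : PySem.List.slice sub (some (midB + 1)) none =
          (arr.drop (midA + 1).toNat).take (high + 1 - (midA + 1)).toNat := by
        have e1 : low.toNat + (midB + 1).toNat = (midA + 1).toNat := by omega
        have e2 : (high + 1 - low).toNat - (midB + 1).toNat = (high + 1 - (midA + 1)).toNat := by omega
        rw [PySem.List.slice_from sub (show (0:Int) ≤ midB + 1 by omega), hsub,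
          List.drop_take, List.drop_drop, e1, e2]
      have hslice_l : PySem.List.slice sub none (some midB) =
          (arr.drop low.toNat).take ((midA - 1) + 1 - low).toNat := by
        have e3 : min midB.toNat (high + 1 - low).toNat = ((midA - 1) + 1 - low).toNat := by omega
        rw [PySem.List.slice_to sub (show (0:Int) ≤ midB by omega), hsub, List.take_take, e3]
      rw [bsn_loop_step arr x t low high hlh _ hidxA,
        bsn_alt_step sub x t hsubne _ hidxB', hcast, ← hmidB, hslice_r, hslice_l]
      split_ifs with h1 h2 h3
      · rfl
      · exact ih (midA + 1) high (by omega) (by omega) hhigh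
      · exact ih low (midA - 1) (by omega) hlow (by omega)
      · rfl
    · have h0 : (high + 1 - low).toNat = 0 := by omega
      rw [bsnLoop, dif_neg hlh, h0, List.take_zero, binary_search_near_alt]

-- ===== VERDICT (by name: the statement is the Claim_ definition above) =====
theorem binary_search_near_spec : Claim_equal_binary_search_near := by
  intro arr x t _
  unfold Spec_binary_search_near binary_search_near
  have h := bsn_loop_eq_alt arr x t arr.length 0 ((arr.length : Int) - 1) (by omega) le_rfl (by omega)
  rw [h]
  have hfull : (arr.drop (0:Int).toNat).take (((arr.length : Int) - 1) + 1 - 0).toNat = arr := by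
    simp
  rw [hfull]
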